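-- pv_equiv track=rewrite | github.com/JuanImpata/Programacion-1 | Entregable_Parcial_2.py | generar_calendario
-- ===== SOURCE A (Python) =====
-- def es_bisiesto(anio):
--     return (anio % 4 == 0 and anio % 100 != 0) or (anio % 400 == 0)
--
-- def dias_en_mes(mes, anio):
--     if mes < 1 or mes > 12:
--         raise ValueError("Mes invalido")
--     dias_por_mes = [31, 29 if es_bisiesto(anio) else 28, 31, 30, 31, 30, 31, 31, 30, 31, 30, 31]
--     return dias_por_mes[mes - 1]
--
-- def generar_calendario(mes, anio, dia_inicio=0):
--     if dia_inicio < 0 or dia_inicio > 6: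
--         dia_inicio = dia_inicio % 7
--     dias = dias_en_mes(mes, anio)
--     encabezado = "Lu Ma Mi Ju Vi Sa Do"
--     calendario = [encabezado]
--     fila = "   " * dia_inicio
--     for dia in range(1, dias + 1):
--         fila += f"{dia:2d} "
--         if (dia + dia_inicio) % 7 == 0 or dia == dias:
--             calendario.append(fila.rstrip())
--             fila = ""
--     return "\n".join(calendario)
-- ===== SOURCE B (Python) =====
-- def es_bisiesto(anio):
--     return (anio % 4 == 0 and anio % 100 != 0) or (anio % 400 == 0)
--
-- def dias_en_mes(mes, anio):
--     if mes < 1 or mes > 12: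
--         raise ValueError("Mes invalido")
--     dias_por_mes = [31, 29 if es_bisiesto(anio) else 28, 31, 30, 31, 30, 31, 31, 30, 31, 30, 31]
--     return dias_por_mes[mes - 1]
--
-- def generar_calendario(mes, anio, dia_inicio=0):
--     dias = dias_en_mes(mes, anio)
--     celdas = ["   "] * (dia_inicio % 7) + [f"{dia:2d} " for dia in range(1, dias + 1)]
--     filas = ["".join(celdas[i:i + 7]).rstrip() for i in range(0, len(celdas), 7)]
--     return "\n".join(["Lu Ma Mi Ju Vi Sa Do"] + filas)
-- ===== Notes on version B (the rewrite author's own statement) =====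
-- stated objective: alternative
-- what changed: B builds one flat list of cell strings (blanks then formatted days) and chunks it into rows of 7 via slicing, replacing A's single accumulating pass that flushes a row buffer at week boundaries.
-- outside the precondition, e.g. on generar_calendario(13, 2024, 0): A raises ValueError, B raises ValueError
import Mathlib
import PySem

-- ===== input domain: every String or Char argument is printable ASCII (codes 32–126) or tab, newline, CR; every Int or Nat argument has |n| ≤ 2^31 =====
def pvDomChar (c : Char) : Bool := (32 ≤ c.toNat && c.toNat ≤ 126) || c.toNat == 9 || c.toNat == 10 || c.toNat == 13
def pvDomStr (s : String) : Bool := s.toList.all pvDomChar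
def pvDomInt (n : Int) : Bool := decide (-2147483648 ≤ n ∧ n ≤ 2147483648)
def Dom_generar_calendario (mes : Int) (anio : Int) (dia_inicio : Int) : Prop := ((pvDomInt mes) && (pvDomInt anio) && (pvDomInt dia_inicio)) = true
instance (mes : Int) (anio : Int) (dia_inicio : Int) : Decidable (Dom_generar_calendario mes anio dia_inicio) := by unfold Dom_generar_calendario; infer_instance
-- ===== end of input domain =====

-- B rebuilds the calendar by first making one flat list of cell strings and then chunking it into
-- rows of 7, instead of A's single accumulating pass that flushes a row buffer on week boundaries.


-- ===== PORT A =====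
def esBisiestoA (anio : Int) : Bool :=
  (PySem.Int.mod anio 4 == 0 && !(PySem.Int.mod anio 100 == 0)) || PySem.Int.mod anio 400 == 0

-- none = the ValueError branch of dias_en_mes
def diasEnMesA? (mes : Int) (anio : Int) : Option Int :=
  if mes < 1 || mes > 12 then none
  else PySem.List.pyGet?
    [31, if esBisiestoA anio then 29 else 28, 31, 30, 31, 30, 31, 31, 30, 31, 30, 31] (mes - 1)

-- f"{dia:2d} ": str(dia) left-padded with spaces to width 2, plus the trailing space (exact for width 2)
def celda (dia : Int) : String :=
  (if PySem.Str.len (PySem.Int.toStr dia) < 2 then " " ++ PySem.Int.toStr dia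
   else PySem.Int.toStr dia) ++ " "

-- "   " * n : Python str*int (n.toNat clamps negatives to 0, exactly as Python yields '')
def strTimes (s : String) (n : Int) : String := PySem.Str.join "" (List.replicate n.toNat s)

-- the body of A's for-loop, state = (calendario, fila)
def pasoA (dias : Int) (d0 : Int) (st : List String × String) (dia : Int) : List String × String :=
  let fila := st.2 ++ celda dia
  if PySem.Int.mod (dia + d0) 7 == 0 || dia == dias then (st.1 ++ [PySem.Str.rstrip fila], "")
  else (st.1, fila)

def cuerpoA (dias : Int) (d0 : Int) : String :=
  PySem.Str.join "\n"
    (((PySem.List.pyRange 1 (dias + 1) 1).foldl (pasoA dias d0)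
      (["Lu Ma Mi Ju Vi Sa Do"], strTimes "   " d0)).1)

def generar_calendario (mes : Int) (anio : Int) (dia_inicio : Int) : String :=
  let d0 := if dia_inicio < 0 || dia_inicio > 6 then PySem.Int.mod dia_inicio 7 else dia_inicio
  match diasEnMesA? mes anio with
  | none => ""        -- Python raises ValueError here; excluded by Pre_
  | some dias => cuerpoA dias d0

-- ===== PORT B =====
def esBisiestoB (anio : Int) : Bool :=
  (PySem.Int.mod anio 4 == 0 && !(PySem.Int.mod anio 100 == 0)) || PySem.Int.mod anio 400 == 0

def diasEnMesB? (mes : Int) (anio : Int) : Option Int :=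
  if mes < 1 || mes > 12 then none
  else PySem.List.pyGet?
    [31, if esBisiestoB anio then 29 else 28, 31, 30, 31, 30, 31, 31, 30, 31, 30, 31] (mes - 1)

def cuerpoB (dias : Int) (s : Int) : String :=
  let celdas := List.replicate s.toNat "   " ++ (PySem.List.pyRange 1 (dias + 1) 1).map celda
  let filas := (PySem.List.pyRange 0 (celdas.length : Int) 7).map
    (fun i => PySem.Str.rstrip (PySem.Str.join "" (PySem.List.slice celdas (some i) (some (i + 7)))))
  PySem.Str.join "\n" ("Lu Ma Mi Ju Vi Sa Do" :: filas)

def generar_calendario_alt (mes : Int) (anio : Int) (dia_inicio : Int) : String :=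
  match diasEnMesB? mes anio with
  | none => ""        -- ValueError in Source B too; excluded by Pre_
  | some dias => cuerpoB dias (PySem.Int.mod dia_inicio 7)

-- ===== PRECONDITION & SPEC =====
-- A (and B) raise ValueError("Mes invalido") when mes is outside 1..12; exactly those inputs are excluded.
def Pre_generar_calendario (mes : Int) (anio : Int) (dia_inicio : Int) : Prop := 1 ≤ mes ∧ mes ≤ 12
instance (mes : Int) (anio : Int) (dia_inicio : Int) : Decidable (Pre_generar_calendario mes anio dia_inicio) := by unfold Pre_generar_calendario; infer_instance
def pvWitness_generar_calendario : Int × Int × Int := (2, 2024, 3)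

def Spec_generar_calendario (mes : Int) (anio : Int) (dia_inicio : Int) (out : String) : Prop := out = generar_calendario_alt mes anio dia_inicio
instance (mes : Int) (anio : Int) (dia_inicio : Int) (out : String) : Decidable (Spec_generar_calendario mes anio dia_inicio out) := by unfold Spec_generar_calendario; infer_instance

-- ===== CLAIM (what is proved, stated in full; the proofs are below) =====
def Claim_equal_generar_calendario : Prop := ∀ (mes : Int) (anio : Int) (dia_inicio : Int), Dom_generar_calendario mes anio dia_inicio → Pre_generar_calendario mes anio dia_inicio → Spec_generar_calendario mes anio dia_inicio (generar_calendario mes anio dia_inicio)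

-- ===== LEMMAS AND PROOFS =====
-- Proof-side abbreviations: pvJ concatenates cell strings, pvCells is the flat cell list.
def pvJ (l : List String) : String := PySem.Str.join "" l

def pvCells (s n : Nat) : List String :=
  List.replicate s "   " ++ (List.range n).map (fun (k : Nat) => celda (1 + (k : Int)))

-- A's loop body without the `dia == dias` final-day test (equal to pasoA on every non-final day)
def pasoNF (d0 : Int) (st : List String × String) (dia : Int) : List String × String :=
  let fila := st.2 ++ celda dia
  if PySem.Int.mod (dia + d0) 7 == 0 then (st.1 ++ [PySem.Str.rstrip fila], "")
  else (st.1, fila)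

lemma charsJoin_append (ps : List (List Char)) (q : List Char) :
    PySem.Chars.join [] (ps ++ [q]) = PySem.Chars.join [] ps ++ q := by
  induction ps with
  | nil => simp [PySem.Chars.join_nil, PySem.Chars.join_singleton]
  | cons p rest ih =>
    cases rest with
    | nil => simp [PySem.Chars.join_singleton, PySem.Chars.join_cons_cons]
    | cons r t =>
      rw [List.cons_append, PySem.Chars.join_cons_cons, List.cons_append,
        PySem.Chars.join_cons_cons, ← List.cons_append, ih]
      simp

lemma pvJ_append (xs : List String) (y : String) : pvJ (xs ++ [y]) = pvJ xs ++ y := by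
  apply String.toList_inj.mp
  simp only [pvJ, PySem.Str.toList_join, String.toList_append, List.map_append, List.map_cons,
    List.map_nil]
  exact charsJoin_append _ _

lemma length_pvCells (s n : Nat) : (pvCells s n).length = s + n := by simp [pvCells]

lemma pvCells_succ (s n : Nat) :
    pvCells s (n + 1) = pvCells s n ++ [celda (1 + (n : Int))] := by
  simp [pvCells, List.range_succ]

-- chunk j of the flat list is unchanged by appending cells past it
lemma chunk_stable (s n j : Nat) (h : 7 * j + 7 ≤ s + n) (x : String) :
    ((pvCells s n ++ [x]).drop (7 * j)).take 7 = ((pvCells s n).drop (7 * j)).take 7 := by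
  rw [List.drop_append_of_le_length (by rw [length_pvCells]; omega),
    List.take_append_of_le_length (by simp [length_pvCells]; omega)]

-- loop invariant for the no-final-flush loop
lemma invNF (s : Nat) (hs : s < 7) (r0 : List String) :
    ∀ n : Nat,
    ((List.range n).map (fun (k : Nat) => 1 + (k : Int))).foldl (pasoNF s)
        (r0, pvJ (List.replicate s "   "))
      = (r0 ++ (List.range ((s + n) / 7)).map
            (fun j => PySem.Str.rstrip (pvJ (((pvCells s n).drop (7 * j)).take 7))),
         pvJ ((pvCells s n).drop (7 * ((s + n) / 7)))) := by
  intro n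
  induction n with
  | zero =>
    have h0 : s / 7 = 0 := Nat.div_eq_of_lt hs
    simp [h0, pvCells, List.drop_replicate]
  | succ n ih =>
    rw [List.range_succ, List.map_append, List.foldl_append, ih]
    simp only [List.map_cons, List.map_nil, List.foldl_cons, List.foldl_nil]
    have hmod : PySem.Int.mod ((1 + (n : Int)) + (s : Int)) 7 = (((s + n + 1) % 7 : Nat) : Int) := by
      rw [PySem.Int.mod_eq_emod_of_pos (by omega)]
      omega
    unfold pasoNF
    simp only [hmod]
    have hq : 7 * ((s + n) / 7) ≤ s + n := by omega
    have hfila : pvJ ((pvCells s n).drop (7 * ((s + n) / 7))) ++ celda (1 + (n : Int))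
        = pvJ ((pvCells s (n + 1)).drop (7 * ((s + n) / 7))) := by
      rw [pvCells_succ, List.drop_append_of_le_length (by rw [length_pvCells]; omega), pvJ_append]
    by_cases h : (s + n + 1) % 7 = 0
    · have hbeq : ((((s + n + 1) % 7 : Nat) : Int) == 0) = true := by simp [h]
      rw [if_pos hbeq]
      have hq1 : (s + (n + 1)) / 7 = (s + n) / 7 + 1 := by omega
      have hlen : (pvCells s (n + 1)).length = 7 * ((s + n) / 7) + 7 := by
        rw [length_pvCells]; omega
      simp only [Prod.mk.injEq]
      refine ⟨?_, ?_⟩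
      · have hmapEq : (List.range ((s + n) / 7)).map
            (fun j => PySem.Str.rstrip (pvJ (((pvCells s (n + 1))).drop (7 * j) |>.take 7)))
            = (List.range ((s + n) / 7)).map
            (fun j => PySem.Str.rstrip (pvJ (((pvCells s n)).drop (7 * j) |>.take 7))) := by
          apply List.map_congr_left
          intro j hj
          rw [List.mem_range] at hj
          rw [pvCells_succ, chunk_stable s n j (by omega)]
        have hlastEq : PySem.Str.rstrip
              (pvJ (((pvCells s (n + 1)).drop (7 * ((s + n) / 7))).take 7))
            = PySem.Str.rstrip
              (pvJ ((pvCells s n).drop (7 * ((s + n) / 7))) ++ celda (1 + (n : Int))) := by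
          rw [List.take_of_length_le (by rw [List.length_drop, hlen]; omega), hfila]
        rw [hq1, List.range_succ, List.map_append, List.map_singleton, hmapEq, hlastEq,
          ← List.append_assoc]
      · rw [hq1]
        rw [List.drop_of_length_le (by rw [hlen]; omega)]
        rfl
    · have hbeq : ¬ (((((s + n + 1) % 7 : Nat) : Int) == 0) = true) := by
        simp; omega
      rw [if_neg hbeq]
      have hq1 : (s + (n + 1)) / 7 = (s + n) / 7 := by omega
      simp only [Prod.mk.injEq]
      refine ⟨?_, ?_⟩
      · have hmapEq : (List.range ((s + n) / 7)).map
            (fun j => PySem.Str.rstrip (pvJ (((pvCells s (n + 1))).drop (7 * j) |>.take 7)))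
            = (List.range ((s + n) / 7)).map
            (fun j => PySem.Str.rstrip (pvJ (((pvCells s n)).drop (7 * j) |>.take 7))) := by
          apply List.map_congr_left
          intro j hj
          rw [List.mem_range] at hj
          rw [pvCells_succ, chunk_stable s n j (by omega)]
        rw [hq1, hmapEq]
      · rw [hq1, hfila]

-- A's rows, in chunk form
lemma cuerpoA_rows (s n : Nat) (hs : s < 7) (hn : 1 ≤ n) :
    cuerpoA (n : Int) (s : Int)
      = PySem.Str.join "\n" ("Lu Ma Mi Ju Vi Sa Do" ::
          (List.range ((s + n + 6) / 7)).map
            (fun j => PySem.Str.rstrip (pvJ (((pvCells s n).drop (7 * j)).take 7)))) := by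
  obtain ⟨m, rfl⟩ : ∃ m, n = m + 1 := ⟨n - 1, by omega⟩
  unfold cuerpoA
  rw [PySem.List.pyRange_one]
  have harg : (((m + 1 : Nat) : Int) + 1 - 1).toNat = m + 1 := by omega
  rw [harg, List.range_succ, List.map_append, List.map_singleton, List.foldl_append]
  have hstrTimes : strTimes "   " ((s : Nat) : Int) = pvJ (List.replicate s "   ") := by
    simp [strTimes, pvJ]
  rw [hstrTimes]
  have hcongr : List.foldl (pasoA ((m + 1 : Nat) : Int) ((s : Nat) : Int))
        (["Lu Ma Mi Ju Vi Sa Do"], pvJ (List.replicate s "   "))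
        ((List.range m).map (fun (k : Nat) => 1 + (k : Int)))
      = List.foldl (pasoNF ((s : Nat) : Int))
        (["Lu Ma Mi Ju Vi Sa Do"], pvJ (List.replicate s "   "))
        ((List.range m).map (fun (k : Nat) => 1 + (k : Int))) := by
    apply PySem.List.foldl_congr_mem
    intro acc x hx
    rw [List.mem_map] at hx
    obtain ⟨k, hk, rfl⟩ := hx
    rw [List.mem_range] at hk
    unfold pasoA pasoNF
    have hne : ((1 + (k : Int)) == ((m + 1 : Nat) : Int)) = false := by
      simp; omega
    rw [hne, Bool.or_false]
  rw [hcongr, invNF s hs ["Lu Ma Mi Ju Vi Sa Do"] m]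
  rw [List.foldl_cons, List.foldl_nil]
  unfold pasoA
  have htrue : ((PySem.Int.mod ((1 + (m : Int)) + ((s : Nat) : Int)) 7 == 0)
      || ((1 + (m : Int)) == ((m + 1 : Nat) : Int))) = true := by
    have : ((1 + (m : Int)) == ((m + 1 : Nat) : Int)) = true := by simp; omega
    rw [this, Bool.or_true]
  rw [if_pos htrue]
  have hq1 : (s + (m + 1) + 6) / 7 = (s + m) / 7 + 1 := by omega
  have hmapEq : (List.range ((s + m) / 7)).map
      (fun j => PySem.Str.rstrip (pvJ (((pvCells s (m + 1))).drop (7 * j) |>.take 7)))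
      = (List.range ((s + m) / 7)).map
      (fun j => PySem.Str.rstrip (pvJ (((pvCells s m)).drop (7 * j) |>.take 7))) := by
    apply List.map_congr_left
    intro j hj
    rw [List.mem_range] at hj
    rw [pvCells_succ, chunk_stable s m j (by omega)]
  have hlastEq : PySem.Str.rstrip
        (pvJ (((pvCells s (m + 1)).drop (7 * ((s + m) / 7))).take 7))
      = PySem.Str.rstrip
        (pvJ ((pvCells s m).drop (7 * ((s + m) / 7))) ++ celda (1 + (m : Int))) := by
    rw [List.take_of_length_le (by rw [List.length_drop, length_pvCells]; omega),
      pvCells_succ, List.drop_append_of_le_length (by rw [length_pvCells]; omega), pvJ_append]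
  rw [hq1, List.range_succ, List.map_append, List.map_singleton, hmapEq, hlastEq]
  simp

-- B's rows, in chunk form
lemma cuerpoB_rows (s n : Nat) (hn : 1 ≤ n) :
    cuerpoB (n : Int) (s : Int)
      = PySem.Str.join "\n" ("Lu Ma Mi Ju Vi Sa Do" ::
          (List.range ((s + n + 6) / 7)).map
            (fun j => PySem.Str.rstrip (pvJ (((pvCells s n).drop (7 * j)).take 7)))) := by
  simp only [cuerpoB]
  have hcells : List.replicate ((s : Nat) : Int).toNat "   "
        ++ (PySem.List.pyRange 1 ((n : Int) + 1) 1).map celda = pvCells s n := by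
    rw [PySem.List.pyRange_one, List.map_map]
    have harg : ((n : Int) + 1 - 1).toNat = n := by omega
    rw [harg]
    simp [pvCells, Function.comp_def]
  rw [hcells]
  have hlen : ((pvCells s n).length : Int) = ((s + n : Nat) : Int) := by
    rw [length_pvCells]
  rw [hlen, PySem.List.pyRange_of_pos 0 ((s + n : Nat) : Int) (by omega)]
  have hif : (if (0 : Int) < ((s + n : Nat) : Int) then
        ((((s + n : Nat) : Int) - 0 + 7 - 1) / 7).toNat else 0) = (s + n + 6) / 7 := by
    rw [if_pos (by omega)]
    omega
  rw [hif, List.map_map]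
  refine congrArg (PySem.Str.join "\n") (congrArg ("Lu Ma Mi Ju Vi Sa Do" :: ·) ?_)
  apply List.map_congr_left
  intro k hk
  rw [List.mem_range] at hk
  have h1 : (0 : Int) + 7 * (k : Int) = ((7 * k : Nat) : Int) := by push_cast; ring
  have h2 : ((7 * k : Nat) : Int) + 7 = ((7 * k : Nat) : Int) + ((7 : Nat) : Int) := by
    push_cast; ring
  simp only [Function.comp_def, h1, h2, PySem.List.slice_natCast_add]
  rfl

lemma cuerpo_eq (dias s : Int) (hd : 1 ≤ dias) (hs : 0 ≤ s ∧ s < 7) :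
    cuerpoA dias s = cuerpoB dias s := by
  obtain ⟨hs0, hs7⟩ := hs
  obtain ⟨n, rfl⟩ : ∃ n : Nat, dias = (n : Int) := ⟨dias.toNat, (Int.toNat_of_nonneg (by omega)).symm⟩
  obtain ⟨m, rfl⟩ : ∃ m : Nat, s = (m : Int) := ⟨s.toNat, (Int.toNat_of_nonneg hs0).symm⟩
  rw [cuerpoA_rows m n (by omega) (by omega), cuerpoB_rows m n (by omega)]

lemma diasB_eq_diasA (mes anio : Int) : diasEnMesB? mes anio = diasEnMesA? mes anio := rfl

-- the month length is always positive (in fact 28..31)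
lemma diasEnMesA?_mem (mes anio : Int) (h1 : 1 ≤ mes) (h2 : mes ≤ 12) :
    ∃ dias, diasEnMesA? mes anio = some dias ∧ 1 ≤ dias := by
  interval_cases mes <;>
    first
      | exact ⟨31, rfl, by omega⟩
      | exact ⟨30, rfl, by omega⟩
      | (cases hb : esBisiestoA anio <;> simp [diasEnMesA?, hb])

-- A's normalization of dia_inicio equals taking mod 7 unconditionally
lemma d0_eq_mod (d : Int) :
    (if d < 0 || d > 6 then PySem.Int.mod d 7 else d) = PySem.Int.mod d 7 := by
  split
  · rfl
  · rename_i h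
    simp only [Bool.or_eq_true, decide_eq_true_eq, not_or] at h
    rw [PySem.Int.mod_eq_emod_of_pos (by omega)]
    omega

-- ===== VERDICT (by name: the statement is the Claim_ definition above) =====
theorem generar_calendario_spec : Claim_equal_generar_calendario := by
  intro mes anio d _hdom hpre
  obtain ⟨h1, h2⟩ := hpre
  obtain ⟨dias, hdias, hmem⟩ := diasEnMesA?_mem mes anio h1 h2
  unfold Spec_generar_calendario generar_calendario generar_calendario_alt
  rw [diasB_eq_diasA, hdias]
  simp only [d0_eq_mod]
  exact cuerpo_eq dias (PySem.Int.mod d 7)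
    hmem ⟨PySem.Int.mod_nonneg d (by omega), PySem.Int.mod_lt d (by omega)⟩
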